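-- pv_equiv track=rewrite | github.com/CHu292/Security_Operations_Center | Technologies_and_methods_of_programming/Buoi_2/bai_2/test_2.py | max_product_with_gap
-- ===== SOURCE A (Python) =====
-- def max_product_with_gap(arr):
--     N = len(arr)
--     max_so_far = arr[0]
--     max_product = 0
--
--     for i in range(8, N):
--         max_product = max(max_product, arr[i] * max_so_far)
--         max_so_far = max(max_so_far, arr[i - 7])  # Cập nhật giá trị tối đa cho cửa sổ
--
--     return max_product
-- ===== SOURCE B (Python) =====
-- def max_product_with_gap(arr):
--     # Two-phase: build a prefix-maximum table, then scan products with a 7-gap.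
--     pm = [arr[0]]
--     for x in arr[1:]:
--         pm.append(max(pm[-1], x))
--     best = 0
--     for i in range(8, len(arr)):
--         best = max(best, arr[i] * pm[i - 8])
--     return best
-- ===== Notes on version B (the rewrite author's own statement) =====
-- stated objective: alternative
-- what changed: Replaces A's single interleaved pass maintaining a lagged running maximum with a two-phase structure: first build a prefix-maximum table pm, then a separate scan taking max of arr[i]*pm[i-8].
import Mathlib
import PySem

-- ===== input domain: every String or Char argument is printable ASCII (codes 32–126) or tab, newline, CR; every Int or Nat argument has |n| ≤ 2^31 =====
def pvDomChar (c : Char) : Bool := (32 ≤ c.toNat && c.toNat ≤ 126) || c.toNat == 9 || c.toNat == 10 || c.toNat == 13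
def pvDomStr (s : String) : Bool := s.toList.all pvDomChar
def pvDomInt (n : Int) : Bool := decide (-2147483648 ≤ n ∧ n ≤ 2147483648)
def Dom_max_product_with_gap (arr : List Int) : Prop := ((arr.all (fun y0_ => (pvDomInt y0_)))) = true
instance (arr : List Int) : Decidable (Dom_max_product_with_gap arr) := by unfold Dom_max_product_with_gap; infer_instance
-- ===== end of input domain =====

-- B replaces A's single interleaved pass (lagged running max) by a two-phase
-- build-prefix-max-table-then-scan decomposition; same O(n) cost (objective: alternative).

-- ===== PORT A =====
-- A: one pass, state (max_so_far, max_product); max_product updated with the OLD max_so_far.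
def max_product_with_gap (arr : List Int) : Int :=
  let N : Int := arr.length
  ((PySem.List.pyRange 8 N 1).foldl
    (fun (s : Int × Int) i =>
      (max s.1 (PySem.List.pyGetD arr (i - 7) 0),
       max s.2 (PySem.List.pyGetD arr i 0 * s.1)))
    (PySem.List.pyGetD arr 0 0, 0)).2

-- ===== PORT B =====
-- B: phase 1 builds prefix-max table pm (arr[1:] = tail); phase 2 scans products arr[i]*pm[i-8].
def max_product_with_gap_alt (arr : List Int) : Int :=
  let pm : List Int :=
    arr.tail.foldl (fun pm x => pm ++ [max (pm.getLastD 0) x]) [PySem.List.pyGetD arr 0 0]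
  (PySem.List.pyRange 8 (arr.length : Int) 1).foldl
    (fun best i => max best (PySem.List.pyGetD arr i 0 * PySem.List.pyGetD pm (i - 8) 0)) 0

-- ===== PRECONDITION & SPEC =====
-- Pre_: arr must be nonempty — Python A raises IndexError on [] at arr[0] (so does B).
def Pre_max_product_with_gap (arr : List Int) : Prop := arr ≠ []
instance (arr : List Int) : Decidable (Pre_max_product_with_gap arr) := by unfold Pre_max_product_with_gap; infer_instance
def pvWitness_max_product_with_gap : List Int := [3, -1, 2, 0, 5, -2, 1, 4, 7, -3, 6]

def Spec_max_product_with_gap (arr : List Int) (out : Int) : Prop := out = max_product_with_gap_alt arr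
instance (arr : List Int) (out : Int) : Decidable (Spec_max_product_with_gap arr out) := by unfold Spec_max_product_with_gap; infer_instance

-- ===== CLAIM (what is proved, stated in full; the proofs are below) =====
def Claim_equal_max_product_with_gap : Prop := ∀ (arr : List Int), Dom_max_product_with_gap arr → Pre_max_product_with_gap arr → Spec_max_product_with_gap arr (max_product_with_gap arr)

-- ===== LEMMAS AND PROOFS =====

-- functional form of B's phase-1 appends: the tail of the prefix-max table
def tailScan (m : Int) : List Int → List Int
  | [] => []
  | y :: ys => max m y :: tailScan (max m y) ys

theorem foldl_pm_eq_tailScan (ys : List Int) : ∀ (acc : List Int) (x : Int),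
    ys.foldl (fun pm x => pm ++ [max (pm.getLastD 0) x]) (acc ++ [x])
      = (acc ++ [x]) ++ tailScan x ys := by
  induction ys with
  | nil => intro acc x; simp [tailScan]
  | cons y ys ih =>
    intro acc x
    have h1 : ((acc ++ [x]).getLastD 0) = x := by simp
    simp only [List.foldl_cons, h1, tailScan]
    have := ih (acc ++ [x]) (max x y)
    simpa [List.append_assoc] using this

theorem tailScan_length (ys : List Int) : ∀ m : Int, (tailScan m ys).length = ys.length := by
  induction ys with
  | nil => intro m; rfl
  | cons y ys ih => intro m; simp [tailScan, ih]

theorem tailScan_zero (ys : List Int) (m : Int) (h : ys ≠ []) :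
    (tailScan m ys).getD 0 0 = max m (ys.getD 0 0) := by
  cases ys with
  | nil => exact absurd rfl h
  | cons y ys => simp [tailScan]

theorem tailScan_succ (ys : List Int) : ∀ (m : Int) (t : Nat), t + 1 < ys.length →
    (tailScan m ys).getD (t + 1) 0 = max ((tailScan m ys).getD t 0) (ys.getD (t + 1) 0) := by
  induction ys with
  | nil => intro m t ht; simp at ht
  | cons y ys ih =>
    intro m t ht
    cases t with
    | zero =>
      have hne : ys ≠ [] := by
        cases ys with
        | nil => simp at ht
        | cons _ _ => simp
      simp only [tailScan, List.getD_cons_succ, List.getD_cons_zero]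
      rw [tailScan_zero ys (max m y) hne]
    | succ t =>
      have ht' : t + 1 < ys.length := by simpa using ht
      simp only [tailScan, List.getD_cons_succ]
      exact ih (max m y) t ht'

-- the prefix-max recurrence of B's table pm = x :: tailScan x xs
theorem pm_rec (x : Int) (xs : List Int) (t : Nat) (ht : t < xs.length) :
    (x :: tailScan x xs).getD (t + 1) 0
      = max ((x :: tailScan x xs).getD t 0) ((x :: xs).getD (t + 1) 0) := by
  cases t with
  | zero =>
    have hne : xs ≠ [] := by cases xs with | nil => simp at ht | cons _ _ => simp
    simp only [List.getD_cons_succ, List.getD_cons_zero]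
    exact tailScan_zero xs x hne
  | succ t =>
    have ht' : t + 1 < xs.length := ht
    simp only [List.getD_cons_succ]
    exact tailScan_succ xs x t ht'

theorem pyGetD_toNat (xs : List Int) (i : Int) (hi : 0 ≤ i) (h : i < (xs.length : Int)) :
    PySem.List.pyGetD xs i 0 = xs.getD i.toNat 0 := by
  have hlt : i.toNat < xs.length := by omega
  rw [PySem.List.pyGetD_eq_getElem xs 0 hi h, List.getD_eq_getElem _ _ hlt]

-- main loop invariant: A's fold from index j, with max_so_far = pm[j-8], produces B's fold
theorem loop_eq (x : Int) (xs : List Int) :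
    ∀ (n : Nat) (j : Int) (msf mp : Int),
    8 ≤ j → (((x :: xs).length : Int) - j).toNat = n →
    msf = (x :: tailScan x xs).getD (j - 8).toNat 0 →
    ((PySem.List.pyRange j ((x :: xs).length : Int) 1).foldl
      (fun (s : Int × Int) i =>
        (max s.1 (PySem.List.pyGetD (x :: xs) (i - 7) 0),
         max s.2 (PySem.List.pyGetD (x :: xs) i 0 * s.1))) (msf, mp)).2
    = (PySem.List.pyRange j ((x :: xs).length : Int) 1).foldl
        (fun best i => max best (PySem.List.pyGetD (x :: xs) i 0 *
          PySem.List.pyGetD (x :: tailScan x xs) (i - 8) 0)) mp := by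
  intro n
  induction n with
  | zero =>
    intro j msf mp hj hn hmsf
    have hje : ((x :: xs).length : Int) ≤ j := by omega
    rw [PySem.List.pyRange_one_eq_nil hje]
    simp
  | succ n ih =>
    intro j msf mp hj hn hmsf
    have hjlt : j < ((x :: xs).length : Int) := by omega
    rw [PySem.List.pyRange_one_cons hjlt]
    simp only [List.foldl_cons]
    -- B's current pm value equals msf
    have hpmB : PySem.List.pyGetD (x :: tailScan x xs) (j - 8) 0
        = (x :: tailScan x xs).getD (j - 8).toNat 0 := by
      apply pyGetD_toNat
      · omega
      · have : (x :: tailScan x xs).length = (x :: xs).length := by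
          simp [tailScan_length]
        rw [this]; omega
    -- new max_so_far equals pm[(j+1)-8]
    have harr : PySem.List.pyGetD (x :: xs) (j - 7) 0 = (x :: xs).getD (j - 7).toNat 0 := by
      apply pyGetD_toNat
      · omega
      · omega
    have ht : (j - 8).toNat < xs.length := by
      have : (j : Int) < (x :: xs).length := hjlt
      simp only [List.length_cons] at this ⊢
      omega
    have hstep : max msf (PySem.List.pyGetD (x :: xs) (j - 7) 0)
        = (x :: tailScan x xs).getD (j + 1 - 8).toNat 0 := by
      have h1 : (j + 1 - 8).toNat = (j - 8).toNat + 1 := by omega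
      have h2 : (j - 7).toNat = (j - 8).toNat + 1 := by omega
      rw [h1, pm_rec x xs (j - 8).toNat ht, hmsf, harr, h2]
    have hrec := ih (j + 1) (max msf (PySem.List.pyGetD (x :: xs) (j - 7) 0))
      (max mp (PySem.List.pyGetD (x :: xs) j 0 * msf)) (by omega) (by omega) hstep
    rw [hrec, hpmB, ← hmsf]

-- ===== VERDICT (by name: the statement is the Claim_ definition above) =====
theorem max_product_with_gap_spec : Claim_equal_max_product_with_gap := by
  intro arr _ hpre
  unfold Spec_max_product_with_gap max_product_with_gap max_product_with_gap_alt
  cases arr with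
  | nil => exact absurd rfl hpre
  | cons x xs =>
    have hpm : xs.foldl (fun pm x => pm ++ [max (pm.getLastD 0) x])
        [PySem.List.pyGetD (x :: xs) 0 0] = x :: tailScan x xs := by
      have h0 : PySem.List.pyGetD (x :: xs) 0 0 = x := by
        simp [PySem.List.pyGetD_zero_cons]
      rw [h0]
      simpa using foldl_pm_eq_tailScan xs [] x
    simp only [List.tail_cons, hpm]
    exact loop_eq x xs ((((x :: xs).length : Int) - 8).toNat) 8 _ 0 (by omega) rfl
      (by simp [PySem.List.pyGetD_zero_cons])
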